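-- pv_equiv track=rewrite | github.com/baditaflorin/ServerClaw | scripts/run_gate.py | _lane_status
-- ===== SOURCE A (Python) =====
-- def _lane_status(check_statuses: list[str]) -> str:
--     if not check_statuses:
--         return "not_selected"
--     if any(status == "timed_out" for status in check_statuses):
--         return "timed_out"
--     if any(status != "passed" for status in check_statuses):
--         return "failed"
--     return "passed"
-- ===== SOURCE B (Python) =====
-- def _lane_status(check_statuses: list[str]) -> str:
--     if not check_statuses:
--         return "not_selected"
--     all_passed = True
--     for status in check_statuses:
--         if status == "timed_out":
--             return "timed_out"
--         if status != "passed":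
--             all_passed = False
--     return "passed" if all_passed else "failed"
-- ===== Notes on version B (the rewrite author's own statement) =====
-- stated objective: alternative
-- what changed: Replaces the two separate any() scans with a single early-returning loop carrying an all_passed flag.
import Mathlib
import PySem

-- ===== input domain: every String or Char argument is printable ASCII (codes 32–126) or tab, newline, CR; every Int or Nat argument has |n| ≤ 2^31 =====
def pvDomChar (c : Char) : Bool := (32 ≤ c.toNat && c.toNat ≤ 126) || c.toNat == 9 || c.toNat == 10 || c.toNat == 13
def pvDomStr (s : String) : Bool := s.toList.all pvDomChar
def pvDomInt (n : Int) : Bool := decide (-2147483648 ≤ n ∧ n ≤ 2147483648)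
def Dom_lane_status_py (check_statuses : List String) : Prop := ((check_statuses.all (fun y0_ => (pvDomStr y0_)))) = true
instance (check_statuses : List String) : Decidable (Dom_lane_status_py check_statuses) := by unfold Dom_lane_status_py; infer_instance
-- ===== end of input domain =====

-- B: single early-returning pass with an all_passed flag instead of A's two any() scans (alternative decomposition, same cost).
-- ===== PORT A =====
def lane_status_py (check_statuses : List String) : String :=
  if check_statuses = [] then "not_selected"
  else if check_statuses.any (fun status => status == "timed_out") then "timed_out"
  else if check_statuses.any (fun status => status != "passed") then "failed"
  else "passed"

-- ===== PORT B =====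
def lane_status_py_alt_loop (xs : List String) (all_passed : Bool) : String :=
  match xs with
  | [] => if all_passed then "passed" else "failed"
  | status :: rest =>
      if status == "timed_out" then "timed_out"
      else lane_status_py_alt_loop rest (if status != "passed" then false else all_passed)

def lane_status_py_alt (check_statuses : List String) : String :=
  if check_statuses = [] then "not_selected"
  else lane_status_py_alt_loop check_statuses true

-- ===== PRECONDITION & SPEC =====
def Spec_lane_status_py (check_statuses : List String) (out : String) : Prop := out = lane_status_py_alt check_statuses
instance (check_statuses : List String) (out : String) : Decidable (Spec_lane_status_py check_statuses out) := by unfold Spec_lane_status_py; infer_instance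

-- ===== CLAIM (what is proved, stated in full; the proofs are below) =====
def Claim_equal_lane_status_py : Prop := ∀ (check_statuses : List String), Dom_lane_status_py check_statuses → Spec_lane_status_py check_statuses (lane_status_py check_statuses)

-- ===== LEMMAS AND PROOFS =====

lemma any_ne_passed (xs : List String) :
    xs.any (fun s => s != "passed") = !xs.all (fun s => s == "passed") := by
  induction xs with
  | nil => simp
  | cons h t ih =>
      simp only [bne] at ih ⊢
      simp [List.any_cons, List.all_cons, ih]

lemma alt_loop_char (xs : List String) (b : Bool) :
    lane_status_py_alt_loop xs b =
      if xs.any (fun s => s == "timed_out") then "timed_out"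
      else if b && xs.all (fun s => s == "passed") then "passed" else "failed" := by
  induction xs generalizing b with
  | nil => cases b <;> simp [lane_status_py_alt_loop]
  | cons h t ih =>
      simp only [lane_status_py_alt_loop, List.any_cons, List.all_cons, ih]
      by_cases hh : h = "timed_out"
      · simp [hh]
      · have : (h == "timed_out") = false := by simp [hh]
        simp only [this, Bool.false_or, if_neg (by simp [hh] : ¬ (h == "timed_out") = true)]
        by_cases hp : h = "passed" <;> cases b <;> simp [hp]

-- ===== VERDICT (by name: the statement is the Claim_ definition above) =====
theorem lane_status_py_spec : Claim_equal_lane_status_py := by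
  intro xs _
  unfold Spec_lane_status_py lane_status_py lane_status_py_alt
  by_cases he : xs = []
  · simp [he]
  · rw [if_neg he, if_neg he, alt_loop_char]
    by_cases ht : xs.any (fun s => s == "timed_out")
    · simp [ht]
    · have hna := any_ne_passed xs
      simp only [if_neg (show ¬ (xs.any fun s => s == "timed_out") = true from ht), hna]
      cases xs.all (fun s => s == "passed") <;> simp
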